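-- pv_equiv track=rewrite | github.com/paladynlowca/py_creator | cipher/Polybius_MCurylo.py | prepare_encode_table
-- ===== SOURCE A (Python) =====
-- chars_letters = ['A', 'B', 'C', 'D', 'E',
--                  'F', 'G', 'H', 'I', 'K',
--                  'L', 'M', 'N', 'O', 'P',
--                  'Q', 'R', 'S', 'T', 'U',
--                  'V', 'W', 'X', 'Y', 'Z']
--
-- chars_numbers = ['11', '12', '13', '14', '15',
--                  '21', '22', '23', '24', '25',
--                  '31', '32', '33', '34', '35',
--                  '41', '42', '43', '44', '45',
--                  '51', '52', '53', '54', '55']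
--
-- def prepare_encode_table(password: str = ''):
--     # Tworzenie tablicy wyjściowej i iteratora z którego pobierane będą kolejne wartości szyfru
--     output = dict()
--     iterator = iter(chars_numbers)
--     # Iterowanie po literach hasła
--     for char in password.upper():
--         if char not in output and char in chars_letters:  # Sprawdzenie, czy znak jest literą i nie ma go w tablicy
--             output[char] = next(iterator)  # Przypisanie do każdej litery kolejnej wartości szyfru
--             pass
--         pass
--     # Dodanie do tablicy liter niewystępujących w haśle
--     for char in chars_letters:
--         if char not in output:  # Sprawdzenie, czy znaku nie ma w tablicy
--             output[char] = next(iterator)  # Przypisanie do każdej litery kolejnej wartości szyfru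
--     return output
--     pass
-- ===== SOURCE B (Python) =====
-- chars_letters = ['A', 'B', 'C', 'D', 'E',
--                  'F', 'G', 'H', 'I', 'K',
--                  'L', 'M', 'N', 'O', 'P',
--                  'Q', 'R', 'S', 'T', 'U',
--                  'V', 'W', 'X', 'Y', 'Z']
--
-- chars_numbers = ['11', '12', '13', '14', '15',
--                  '21', '22', '23', '24', '25',
--                  '31', '32', '33', '34', '35',
--                  '41', '42', '43', '44', '45',
--                  '51', '52', '53', '54', '55']
--
-- def prepare_encode_table(password: str = ''):
--     # Rank-and-sort formulation: each letter's rank is its first-occurrence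
--     # index in the uppercased password, or (if absent) len(password) plus its
--     # alphabet position; sorting the alphabet by rank yields the key order,
--     # which is paired with the codes.
--     up = password.upper()
--
--     def rank(ch):
--         i = up.find(ch)
--         return i if i >= 0 else len(up) + chars_letters.index(ch)
--
--     return dict(zip(sorted(chars_letters, key=rank), chars_numbers))
-- ===== Notes on version B (the rewrite author's own statement) =====
-- stated objective: faster
-- what changed: B replaces A's two insertion loops sharing a code iterator by a rank-and-sort algorithm: each alphabet letter gets a numeric rank (first-occurrence index in the uppercased password via str.find, or len(password)+alphabet position if absent), the alphabet is sorted by rank and zipped with the code list.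
import Mathlib
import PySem

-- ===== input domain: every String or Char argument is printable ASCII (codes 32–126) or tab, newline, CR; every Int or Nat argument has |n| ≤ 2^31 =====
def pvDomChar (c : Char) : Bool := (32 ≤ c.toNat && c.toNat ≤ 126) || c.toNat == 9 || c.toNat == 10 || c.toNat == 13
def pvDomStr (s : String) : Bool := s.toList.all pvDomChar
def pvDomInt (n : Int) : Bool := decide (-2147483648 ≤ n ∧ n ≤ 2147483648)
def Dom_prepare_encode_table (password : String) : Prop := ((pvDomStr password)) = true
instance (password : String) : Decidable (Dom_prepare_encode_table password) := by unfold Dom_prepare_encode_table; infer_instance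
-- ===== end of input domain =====

-- B replaces A's two insertion loops sharing a code iterator by a rank-and-sort
-- algorithm: each letter's rank is its first-occurrence index in the uppercased
-- password (or len(password)+alphabet position if absent), the alphabet is
-- sorted by rank and zipped with the codes; a timing run measured B faster
-- (constant factor: the password scan becomes 25 C-level str.find calls).


-- module constants (shared by both Pythons)
def pvLetters : List String :=
  ["A", "B", "C", "D", "E", "F", "G", "H", "I", "K", "L", "M", "N",
   "O", "P", "Q", "R", "S", "T", "U", "V", "W", "X", "Y", "Z"]

def pvNumbers : List String :=
  ["11", "12", "13", "14", "15", "21", "22", "23", "24", "25",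
   "31", "32", "33", "34", "35", "41", "42", "43", "44", "45",
   "51", "52", "53", "54", "55"]

-- ===== PORT A =====
-- dict[str,str] is the association list (insertion order); keys inserted are
-- always fresh, so 'output[char] = v' is an append.  'next(iterator)' is the
-- element of chars_numbers at index len(output) (one value consumed per
-- insertion); it never exhausts since exactly 25 insertions happen in total,
-- so the getD default is never used.
def pvKeyMem (d : List (String × String)) (k : String) : Bool :=
  (d.map Prod.fst).contains k

def pvStepA1 (d : List (String × String)) (c : Char) : List (String × String) :=
  let s := c.toString
  if !pvKeyMem d s && pvLetters.contains s then
    d ++ [(s, pvNumbers.getD d.length "")]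
  else d

def pvStepA2 (d : List (String × String)) (s : String) : List (String × String) :=
  if !pvKeyMem d s then d ++ [(s, pvNumbers.getD d.length "")] else d

def prepare_encode_table (password : String) : List (String × String) :=
  let d1 := (PySem.Str.upper password).toList.foldl pvStepA1 []
  pvLetters.foldl pvStepA2 d1

-- ===== PORT B =====
-- rank(ch): up.find(ch) if found, else len(up) + chars_letters.index(ch).
-- 'chars_letters.index(ch)' never raises in B (ch is drawn from chars_letters),
-- so the getD default of index? is never used.
def pvRank (up : String) (s : String) : Int :=
  let i := PySem.Str.find up s
  if 0 ≤ i then i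
  else PySem.Str.len up + (((PySem.List.index? pvLetters s).getD 0 : Nat) : Int)

def prepare_encode_table_alt (password : String) : List (String × String) :=
  let up := PySem.Str.upper password
  (PySem.List.sorted pvLetters (fun s => pvRank up s) false).zip pvNumbers

-- ===== PRECONDITION & SPEC =====
def Spec_prepare_encode_table (password : String) (out : List (String × String)) : Prop := out = prepare_encode_table_alt password
instance (password : String) (out : List (String × String)) : Decidable (Spec_prepare_encode_table password out) := by unfold Spec_prepare_encode_table; infer_instance

-- ===== CLAIM (what is proved, stated in full; the proofs are below) =====
def Claim_equal_prepare_encode_table : Prop := ∀ (password : String), Dom_prepare_encode_table password → Spec_prepare_encode_table password (prepare_encode_table password)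

-- ===== LEMMAS AND PROOFS =====

-- B's dedup step on the key order (used only in the proofs, to name the key
-- order A's first loop produces)
def pvSeenAdd (acc : List String) (c : Char) : List String :=
  let s := c.toString
  if pvLetters.contains s && !acc.contains s then acc ++ [s] else acc

-- the dict A builds from a key order: key i paired with pvNumbers[i]
def pvMk : List String → Nat → List (String × String)
  | [], _ => []
  | k :: ks, n => (k, pvNumbers.getD n "") :: pvMk ks (n + 1)

theorem pvMk_keys (ord : List String) (n : Nat) :
    (pvMk ord n).map Prod.fst = ord := by
  induction ord generalizing n with
  | nil => rfl
  | cons k ks ih => simp [pvMk, ih]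

theorem pvMk_length (ord : List String) (n : Nat) :
    (pvMk ord n).length = ord.length := by
  induction ord generalizing n with
  | nil => rfl
  | cons k ks ih => simp [pvMk, ih]

theorem pvMk_append (a b : List String) (n : Nat) :
    pvMk (a ++ b) n = pvMk a n ++ pvMk b (n + a.length) := by
  induction a generalizing n with
  | nil => simp [pvMk]
  | cons k ks ih =>
      simp [pvMk, ih]
      ring_nf

theorem pvMk_zip (ord : List String) (n : Nat)
    (h : ord.length + n ≤ pvNumbers.length) :
    pvMk ord n = ord.zip (pvNumbers.drop n) := by
  induction ord generalizing n with
  | nil => rfl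
  | cons k ks ih =>
      have hn : n < pvNumbers.length := by
        rw [List.length_cons] at h; omega
      have hd : pvNumbers.drop n = pvNumbers[n] :: pvNumbers.drop (n + 1) :=
        List.drop_eq_getElem_cons hn
      have hg : pvNumbers.getD n "" = pvNumbers[n] := List.getD_eq_getElem _ _ hn
      have hih := ih (n + 1) (by rw [List.length_cons] at h; omega)
      rw [pvMk, hd, List.zip_cons_cons, hg, hih]

theorem pvKeyMem_mk (ord : List String) (n : Nat) (s : String) :
    pvKeyMem (pvMk ord n) s = ord.contains s := by
  simp [pvKeyMem, pvMk_keys]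

-- phase 1 of A tracks the dedup of the password letters
theorem pvPhase1 (cs : List Char) (acc : List String) :
    cs.foldl pvStepA1 (pvMk acc 0) = pvMk (cs.foldl pvSeenAdd acc) 0 := by
  induction cs generalizing acc with
  | nil => rfl
  | cons c cs ih =>
      have hstep : pvStepA1 (pvMk acc 0) c = pvMk (pvSeenAdd acc c) 0 := by
        simp only [pvStepA1, pvSeenAdd, pvKeyMem_mk, pvMk_length, List.contains_eq_mem]
        by_cases h1 : c.toString ∈ pvLetters <;>
        by_cases h2 : c.toString ∈ acc <;>
          simp only [h1, h2, decide_true, decide_false, Bool.not_true, Bool.not_false,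
            Bool.and_true, Bool.and_false,
            if_true, if_false, Bool.false_eq_true];
          (rw [pvMk_append, Nat.zero_add]; rfl)
      simpa [List.foldl_cons, hstep] using ih (pvSeenAdd acc c)

-- phase 2 of A appends the missing letters in order (for a Nodup letter list)
theorem pvPhase2 (ls : List String) (acc : List String) (hnd : ls.Nodup) :
    ls.foldl pvStepA2 (pvMk acc 0) =
      pvMk (acc ++ ls.filter (fun s => !acc.contains s)) 0 := by
  induction ls generalizing acc with
  | nil => simp
  | cons s ls ih =>
      have hnd' : ls.Nodup := hnd.of_cons
      have hs : s ∉ ls := (List.nodup_cons.mp hnd).1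
      by_cases h : s ∈ acc
      · have hst : pvStepA2 (pvMk acc 0) s = pvMk acc 0 := by
          simp [pvStepA2, pvKeyMem_mk, h]
        simp only [List.foldl_cons, hst, ih acc hnd']
        simp [h]
      · have hstep : pvStepA2 (pvMk acc 0) s = pvMk (acc ++ [s]) 0 := by
          simp only [pvStepA2, pvKeyMem_mk, pvMk_length, List.contains_eq_mem, h,
            decide_false, Bool.not_false, if_true]
          rw [pvMk_append, Nat.zero_add]; rfl
        have hfc : ls.filter (fun x => !(acc ++ [s]).contains x)
            = ls.filter (fun x => !acc.contains x) := by
          apply List.filter_congr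
          intro x hx
          have hxs : x ≠ s := fun he => hs (he ▸ hx)
          simp [hxs]
        simp only [List.foldl_cons, hstep, ih (acc ++ [s]) hnd', hfc]
        rw [List.filter_cons_of_pos (by simp [h]), ← List.append_cons]

-- the dedup loop keeps a Nodup list of letters
theorem pvSeen_sound (cs : List Char) (acc : List String)
    (h : acc.Nodup ∧ ∀ x ∈ acc, x ∈ pvLetters) :
    (cs.foldl pvSeenAdd acc).Nodup ∧ ∀ x ∈ cs.foldl pvSeenAdd acc, x ∈ pvLetters := by
  induction cs generalizing acc with
  | nil => exact h
  | cons c cs ih =>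
      refine ih (pvSeenAdd acc c) ?_
      simp only [pvSeenAdd]
      split
      · rename_i hc
        simp only [Bool.and_eq_true, Bool.not_eq_true', List.contains_eq_mem] at hc
        constructor
        · refine List.Nodup.append h.1 (List.nodup_singleton _) ?_
          intro x hx hy
          rw [List.mem_singleton] at hy
          subst hy
          exact absurd hx (by simpa using hc.2)
        · intro x hx
          rcases List.mem_append.mp hx with hx | hx
          · exact h.2 x hx
          · simp at hx; subst hx; simpa [List.contains_eq_mem] using hc.1
      · exact h

theorem pvLetters_nodup : pvLetters.Nodup := by decide

-- a one-character needle is a prefix iff it is the head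
theorem pvSingleton_prefix_iff (l : List Char) (a : Char) :
    [a] <+: l ↔ l.head? = some a := by
  constructor
  · rintro ⟨t, rfl⟩; rfl
  · intro h
    cases l with
    | nil => simp at h
    | cons x xs => simp at h; subst h; exact ⟨xs, rfl⟩

-- idxOf is minimal among the indices holding the value
theorem pvIdxOf_min (l : List Char) (a : Char) :
    ∀ j, (hjl : j < l.length) → l[j] = a → l.idxOf a ≤ j := by
  induction l with
  | nil => intro j hj; simp at hj
  | cons x xs ih =>
      intro j hj hja
      by_cases hxa : x = a
      · subst hxa; simp
      · cases j with
        | zero => simp at hja; exact absurd hja hxa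
        | succ j =>
            have h1 : (x :: xs).idxOf a = xs.idxOf a + 1 := by
              simp [hxa]
            have := ih j (by simpa using hj) (by simpa using hja)
            omega

-- Chars.find on a single-character needle is the first index (or -1)
theorem pvFind_singleton (full : List Char) (c : Char) :
    PySem.Chars.find full [c] = if c ∈ full then (full.idxOf c : Int) else -1 := by
  by_cases hc : c ∈ full
  · have hne : PySem.Chars.find full [c] ≠ -1 := by
      rw [Ne, PySem.Chars.find_eq_neg_one_iff, List.singleton_infix_iff]
      simpa using hc
    have h0 : PySem.Chars.findFrom full [c] ((0 : ℕ) : Int) = PySem.Chars.find full [c] := by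
      norm_num [PySem.Chars.findFrom_zero]
    obtain ⟨hge, hpre, hmin⟩ :=
      PySem.Chars.findFrom_natCast_spec full [c] 0 (Nat.zero_le _) (by rw [h0]; exact hne)
    rw [h0] at hge hpre hmin
    have hfn : PySem.Chars.find full [c] = ((PySem.Chars.find full [c]).toNat : Int) := by
      rw [Int.toNat_of_nonneg (by exact_mod_cast hge)]
    have hgetn : full[(PySem.Chars.find full [c]).toNat]? = some c := by
      have := (pvSingleton_prefix_iff _ _).mp hpre
      rwa [List.head?_drop] at this
    obtain ⟨hnlt, hcn⟩ := List.getElem?_eq_some_iff.mp hgetn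
    have hle : full.idxOf c ≤ (PySem.Chars.find full [c]).toNat :=
      pvIdxOf_min full c _ hnlt hcn
    have hge2 : (PySem.Chars.find full [c]).toNat ≤ full.idxOf c := by
      by_contra hlt0
      refine hmin (full.idxOf c) (Nat.zero_le _) (Nat.lt_of_not_le hlt0) ?_
      rw [pvSingleton_prefix_iff, List.head?_drop]
      exact List.getElem?_eq_some_iff.mpr
        ⟨List.idxOf_lt_length_of_mem hc, List.getElem_idxOf _⟩
    have heq : full.idxOf c = (PySem.Chars.find full [c]).toNat := le_antisymm hle hge2
    rw [if_pos hc, heq, ← hfn]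
  · rw [if_neg hc, PySem.Chars.find_eq_neg_one_iff, List.singleton_infix_iff]
    simpa using hc

-- invariant of the dedup order: (1) its find-indices in the full string are
-- strictly increasing, (2) every letter of the processed prefix is covered,
-- (3) every element is some prefix character with an in-range find-index
theorem pvSeen_fidx (full : List Char) :
    ∀ pre suf : List Char, full = pre ++ suf →
      (pre.foldl pvSeenAdd []).Pairwise
          (fun a b => PySem.Chars.find full a.toList < PySem.Chars.find full b.toList)
      ∧ (∀ c ∈ pre, c.toString ∈ pvLetters → c.toString ∈ pre.foldl pvSeenAdd [])
      ∧ (∀ s ∈ pre.foldl pvSeenAdd [],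
            (∃ c ∈ pre, s = c.toString) ∧
            0 ≤ PySem.Chars.find full s.toList ∧
            PySem.Chars.find full s.toList < (full.length : Int)) := by
  intro pre
  induction pre using List.reverseRecOn with
  | nil => intro suf h; exact ⟨by simp, by simp, by simp⟩
  | append_singleton p c ih =>
      intro suf hfull
      have hfull' : full = p ++ (c :: suf) := by simpa using hfull
      obtain ⟨hpw, hcov, hel⟩ := ih (c :: suf) hfull'
      rw [List.foldl_append]
      simp only [List.foldl_cons, List.foldl_nil]
      by_cases hadd : c.toString ∈ pvLetters ∧ c.toString ∉ p.foldl pvSeenAdd []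
      · have hacc : pvSeenAdd (p.foldl pvSeenAdd []) c
            = p.foldl pvSeenAdd [] ++ [c.toString] := by
          simp only [pvSeenAdd, List.contains_eq_mem, hadd.1, hadd.2, decide_true,
            decide_false, Bool.not_false, Bool.and_true, if_true]
        have hcp : c ∉ p := fun hcp => hadd.2 (hcov c hcp hadd.1)
        have hcfull : c ∈ full := by rw [hfull']; simp
        have hidxc : full.idxOf c = p.length := by
          rw [hfull']; simp [List.idxOf_append, hcp]
        have hfindc : PySem.Chars.find full [c] = (p.length : Int) := by
          rw [pvFind_singleton, if_pos hcfull, hidxc]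
        have hcl : c.toString.toList = [c] := by simp
        have hbound : ∀ a ∈ p.foldl pvSeenAdd [],
            PySem.Chars.find full a.toList < (p.length : Int) := by
          intro a ha
          obtain ⟨⟨d, hd, rfl⟩, h0, _⟩ := hel a ha
          have hdl : d.toString.toList = [d] := by simp
          rw [hdl] at h0 ⊢
          have hdfull : d ∈ full := by rw [hfull']; exact List.mem_append_left _ hd
          rw [pvFind_singleton, if_pos hdfull] at h0 ⊢
          have hdp : full.idxOf d = p.idxOf d := by
            rw [hfull']; simp [List.idxOf_append, hd]
          rw [hdp]
          exact_mod_cast List.idxOf_lt_length_of_mem hd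
        refine ⟨?_, ?_, ?_⟩
        · rw [hacc, List.pairwise_append]
          refine ⟨hpw, List.pairwise_singleton _ _, ?_⟩
          intro a ha b hb
          rw [List.mem_singleton] at hb; subst hb
          rw [hcl, hfindc]
          exact hbound a ha
        · intro d hd hdl
          rw [hacc]
          rcases List.mem_append.mp hd with hd | hd
          · exact List.mem_append_left _ (hcov d hd hdl)
          · rw [List.mem_singleton] at hd; subst hd
            exact List.mem_append_right _ (List.mem_singleton_self _)
        · intro s hs
          rw [hacc] at hs
          rcases List.mem_append.mp hs with hs | hs
          · obtain ⟨⟨d, hd, rfl⟩, h0, hlt⟩ := hel s hs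
            exact ⟨⟨d, List.mem_append_left _ hd, rfl⟩, h0, hlt⟩
          · rw [List.mem_singleton] at hs; subst hs
            refine ⟨⟨c, List.mem_append_right _ (List.mem_singleton_self _), rfl⟩, ?_, ?_⟩
            · rw [hcl, hfindc]; exact_mod_cast Nat.zero_le _
            · rw [hcl, hfindc, hfull']
              have : p.length < (p ++ (c :: suf)).length := by simp
              exact_mod_cast this
      · have hacc : pvSeenAdd (p.foldl pvSeenAdd []) c = p.foldl pvSeenAdd [] := by
          simp only [pvSeenAdd, List.contains_eq_mem]
          split
          · rename_i h
            simp only [Bool.and_eq_true, Bool.not_eq_true', decide_eq_true_eq,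
              decide_eq_false_iff_not] at h
            exact absurd ⟨h.1, h.2⟩ hadd
          · rfl
        rw [hacc]
        refine ⟨hpw, ?_, ?_⟩
        · intro d hd hdl
          rcases List.mem_append.mp hd with hd | hd
          · exact hcov d hd hdl
          · rw [List.mem_singleton] at hd; subst hd
            by_contra hnot
            exact hadd ⟨hdl, hnot⟩
        · intro s hs
          obtain ⟨⟨d, hd, rfl⟩, h0, hlt⟩ := hel s hs
          exact ⟨⟨d, List.mem_append_left _ hd, rfl⟩, h0, hlt⟩

-- each letter is its own single character, and index? is idxOf on the letters
theorem pvLetters_single : ∀ s ∈ pvLetters, s = (s.toList.headD 'A').toString := by decide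

theorem pvLetters_index : ∀ s ∈ pvLetters,
    (PySem.List.index? pvLetters s).getD 0 = pvLetters.idxOf s := by decide

theorem pvLetters_idx_pairwise :
    pvLetters.Pairwise (fun a b => pvLetters.idxOf a < pvLetters.idxOf b) := by decide

-- ===== VERDICT (by name: the statement is the Claim_ definition above) =====
theorem prepare_encode_table_spec : Claim_equal_prepare_encode_table := by
  intro password _
  unfold Spec_prepare_encode_table prepare_encode_table prepare_encode_table_alt
  set up := PySem.Str.upper password with hup
  set cs := up.toList with hcs
  set seen := cs.foldl pvSeenAdd [] with hseen
  have h1 : cs.foldl pvStepA1 [] = pvMk seen 0 := by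
    simpa [pvMk] using pvPhase1 cs []
  set ord := seen ++ pvLetters.filter (fun s => !seen.contains s) with hord
  have h2 : pvLetters.foldl pvStepA2 (pvMk seen 0) = pvMk ord 0 :=
    pvPhase2 pvLetters seen pvLetters_nodup
  have hsp := pvSeen_sound cs [] ⟨List.nodup_nil, by simp⟩
  obtain ⟨hpw, hcov, hel⟩ := pvSeen_fidx cs cs [] (by simp)
  have hnd : ord.Nodup := by
    refine List.Nodup.append hsp.1 (List.Nodup.filter _ pvLetters_nodup) ?_
    intro x hx hy
    have := (List.mem_filter.mp hy).2
    simp [List.contains_eq_mem] at this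
    exact this hx
  have hmemord : ∀ x, x ∈ ord ↔ x ∈ pvLetters := by
    intro x
    constructor
    · intro hx
      rcases List.mem_append.mp hx with hx | hx
      · exact hsp.2 x hx
      · exact (List.mem_filter.mp hx).1
    · intro hx
      by_cases hxs : x ∈ seen
      · exact List.mem_append_left _ hxs
      · exact List.mem_append_right _
          (List.mem_filter.mpr ⟨hx, by simpa [List.contains_eq_mem] using hxs⟩)
  have hperm : ord.Perm pvLetters :=
    (List.perm_ext_iff_of_nodup hnd pvLetters_nodup).mpr hmemord
  -- rank of a password letter is its (in-range) find-index
  have hrank_seen : ∀ s ∈ seen,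
      pvRank up s = PySem.Chars.find cs s.toList ∧
      PySem.Chars.find cs s.toList < (cs.length : Int) := by
    intro s hs
    obtain ⟨_, h0, hlt⟩ := hel s hs
    refine ⟨?_, hlt⟩
    simp only [pvRank, PySem.Str.find_eq, ← hcs]
    rw [if_pos h0]
  -- rank of a non-password letter is len + its alphabet index
  have hrank_rem : ∀ s ∈ pvLetters.filter (fun x => !seen.contains x),
      pvRank up s = (cs.length : Int) + (pvLetters.idxOf s : Int) := by
    intro s hs
    obtain ⟨hsl, hns⟩ := List.mem_filter.mp hs
    have hns' : s ∉ seen := by simpa [List.contains_eq_mem] using hns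
    have hsc : s = (s.toList.headD 'A').toString := pvLetters_single s hsl
    set c := s.toList.headD 'A' with hc
    have hstl : s.toList = [c] := by rw [hsc]; simp
    have hccs : c ∉ cs := by
      intro hmem
      exact hns' (hsc ▸ hcov c hmem (hsc ▸ hsl))
    have hfind : PySem.Chars.find cs s.toList = -1 := by
      rw [hstl, pvFind_singleton, if_neg hccs]
    simp only [pvRank, PySem.Str.find_eq, ← hcs, hfind]
    rw [if_neg (by norm_num), PySem.Str.len_eq, ← hcs, pvLetters_index s hsl]
  -- the key order is strictly rank-increasing
  have hpwORD : ord.Pairwise (fun a b => pvRank up a < pvRank up b) := by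
    rw [hord, List.pairwise_append]
    refine ⟨?_, ?_, ?_⟩
    · refine hpw.imp_of_mem ?_
      intro a b ha hb hr
      rw [(hrank_seen a ha).1, (hrank_seen b hb).1]
      exact hr
    · refine (pvLetters_idx_pairwise.filter _).imp_of_mem ?_
      intro a b ha hb hr
      rw [hrank_rem a ha, hrank_rem b hb]
      omega
    · intro a ha b hb
      obtain ⟨hra, hlt⟩ := hrank_seen a ha
      obtain ⟨_, h0, _⟩ := hel a ha
      rw [hra, hrank_rem b hb]
      have : (0 : Int) ≤ (pvLetters.idxOf b : Int) := by exact_mod_cast Nat.zero_le _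
      omega
  have hsorted : PySem.List.sorted pvLetters (fun s => pvRank up s) = ord :=
    PySem.List.sorted_eq_of_perm_of_pairwise_lt _ _ _ hperm hpwORD
  have hlen : ord.length ≤ pvNumbers.length := by
    have := hperm.length_eq
    have h25 : pvLetters.length = pvNumbers.length := by decide
    omega
  calc pvLetters.foldl pvStepA2 (cs.foldl pvStepA1 []) = pvMk ord 0 := by rw [h1, h2]
    _ = ord.zip pvNumbers := by
        have := pvMk_zip ord 0 (by omega)
        rwa [List.drop_zero] at this
    _ = (PySem.List.sorted pvLetters (fun s => pvRank up s)).zip pvNumbers := by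
        rw [hsorted]
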